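-- pv_equiv track=rewrite | github.com/CVasquezroque/SLP-Framework-MissingLandmarksPose | utils.py | count_false_sequences
-- ===== SOURCE A (Python) =====
-- def count_false_sequences(arr):
--     count = 0
--     curr_false_count = 0
--     for i in range(len(arr)):
--         if not arr[i]:
--             curr_false_count += 1
--         else:
--             if curr_false_count > 0:
--                 count += 1
--             curr_false_count = 0
--     if curr_false_count > 0:
--         count += 1
--     return count
-- ===== SOURCE B (Python) =====
-- def count_false_sequences(arr):
--     # stage 1: run-length encode the truthiness into the list of run keys
--     runs = []
--     for x in arr:
--         b = bool(x)
--         if not runs or runs[-1] != b: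
--             runs.append(b)
--     # stage 2: count the falsy runs
--     return runs.count(False)
-- ===== Notes on version B (the rewrite author's own statement) =====
-- stated objective: alternative
-- what changed: B first run-length-encodes the array into the list of run keys (collapsing consecutive equal truth-values) and then counts the False entries of that list, replacing A's single pass with a running false-counter and end-of-run/trailing flush logic.
import Mathlib
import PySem

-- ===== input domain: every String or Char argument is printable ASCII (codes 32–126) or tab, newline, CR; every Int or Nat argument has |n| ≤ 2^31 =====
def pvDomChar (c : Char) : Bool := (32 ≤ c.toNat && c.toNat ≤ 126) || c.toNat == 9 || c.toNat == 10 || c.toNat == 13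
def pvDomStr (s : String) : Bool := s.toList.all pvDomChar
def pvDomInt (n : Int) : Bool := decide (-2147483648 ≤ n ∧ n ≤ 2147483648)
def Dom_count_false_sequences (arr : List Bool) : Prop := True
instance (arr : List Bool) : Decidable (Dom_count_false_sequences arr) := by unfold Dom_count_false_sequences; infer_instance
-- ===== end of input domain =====

-- B run-length-encodes the array into the list of run keys and counts the False entries,
-- replacing A's single accumulator pass with flush logic (alternative decomposition, same O(n)).

-- ===== PORT A =====
def count_false_sequences (arr : List Bool) : Int :=
  let s := arr.foldl (fun (st : Int × Int) a =>
    if !a then (st.1, st.2 + 1)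
    else (if st.2 > 0 then st.1 + 1 else st.1, 0)) (0, 0)
  if s.2 > 0 then s.1 + 1 else s.1

-- ===== PORT B =====
def count_false_sequences_alt (arr : List Bool) : Int :=
  let runs := arr.foldl (fun (runs : List Bool) x =>
    if runs.isEmpty || runs.getLast? != some x then runs ++ [x] else runs) []
  (runs.count false : Int)

-- ===== PRECONDITION & SPEC =====
def Spec_count_false_sequences (arr : List Bool) (out : Int) : Prop := out = count_false_sequences_alt arr
instance (arr : List Bool) (out : Int) : Decidable (Spec_count_false_sequences arr out) := by unfold Spec_count_false_sequences; infer_instance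

-- ===== CLAIM (what is proved, stated in full; the proofs are below) =====
def Claim_equal_count_false_sequences : Prop := ∀ (arr : List Bool), Dom_count_false_sequences arr → Spec_count_false_sequences arr (count_false_sequences arr)

-- ===== LEMMAS AND PROOFS =====

-- invariant tying A's state (c, k) to B's runs list: the runs list ends in false exactly when
-- A has a pending false-run (0 < k), and its false-count equals c plus the pending run.
theorem cfs_inv (arr : List Bool) (c k : Int) (runs : List Bool)
    (hk : 0 ≤ k)
    (hlast : runs.getLast? = some false ↔ 0 < k)
    (hc : (runs.count false : Int) = c + (if 0 < k then 1 else 0)) :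
    (let s := arr.foldl (fun (st : Int × Int) a =>
      if !a then (st.1, st.2 + 1)
      else (if st.2 > 0 then st.1 + 1 else st.1, 0)) (c, k);
     if s.2 > 0 then s.1 + 1 else s.1) =
    ((arr.foldl (fun (runs : List Bool) x =>
      if runs.isEmpty || runs.getLast? != some x then runs ++ [x] else runs) runs).count false : Int) := by
  induction arr generalizing c k runs with
  | nil =>
    simp only [List.foldl_nil]
    rw [hc]; split_ifs <;> omega
  | cons a t ih =>
    by_cases hcond : (runs.isEmpty || runs.getLast? != some a) = true
    · -- B appends a
      cases a
      · -- a = false, appended ⇒ runs did not end in false ⇒ k = 0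
        have hne : runs.getLast? ≠ some false := by
          rcases Bool.or_eq_true_iff.mp hcond with h | h
          · simp [List.isEmpty_iff.mp h]
          · simpa using h
        have hk0 : k = 0 := by
          have := mt hlast.mpr hne; omega
        subst hk0
        simp only [List.foldl_cons, Bool.not_false, reduceIte, if_pos hcond]
        exact ih c 1 (runs ++ [false]) (by omega)
          (by simp)
          (by simp [List.count_append, hc])
      · -- a = true, appended: count unchanged, runs now ends in true
        have hlast' : (runs ++ [true]).getLast? = some false ↔ (0:Int) < 0 := by simp
        have hcnt : ((runs ++ [true]).count false : Int) = (runs.count false : Int) := by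
          simp [List.count_append]
        simp only [List.foldl_cons, Bool.not_true, if_pos hcond]
        by_cases hkpos : 0 < k
        · rw [if_pos hkpos]
          exact ih (c + 1) 0 (runs ++ [true]) (by omega) hlast'
            (by rw [hcnt, hc, if_pos hkpos]; simp)
        · rw [if_neg hkpos]
          exact ih c 0 (runs ++ [true]) (by omega) hlast'
            (by rw [hcnt, hc, if_neg hkpos]; simp)
    · -- B leaves runs unchanged: runs ends in a
      have hlastA : runs.getLast? = some a := by
        rcases Bool.or_eq_true_iff.not.mp hcond with h
        push Not at h
        have := h.2
        simpa using this
      cases a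
      · have hkpos : 0 < k := hlast.mp hlastA
        simp only [List.foldl_cons, Bool.not_false, reduceIte, if_neg hcond]
        exact ih c (k + 1) runs (by omega) (by simp [hlastA]; omega)
          (by rw [hc, if_pos hkpos, if_pos (by omega : (0:Int) < k + 1)])
      · have hk0 : k = 0 := by
          have : runs.getLast? ≠ some false := by rw [hlastA]; simp
          have := mt hlast.mpr this; omega
        subst hk0
        simp only [List.foldl_cons, Bool.not_true, if_neg hcond]
        have : ¬ ((0:Int) < 0) := by omega
        rw [if_neg this]
        exact ih c 0 runs (by omega) (by rw [hlastA]; simp) hc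

-- ===== VERDICT (by name: the statement is the Claim_ definition above) =====
theorem count_false_sequences_spec : Claim_equal_count_false_sequences := by
  intro arr _
  unfold Spec_count_false_sequences count_false_sequences count_false_sequences_alt
  exact cfs_inv arr 0 0 [] (by omega) (by simp) (by simp)
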